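-- pv_equiv track=rewrite | github.com/nohagamal001/Sentiment-Based-Spatiotemporal-Awareness-Framework-for-Pandemics | wordEmbeddings_and_classificationModels.py | prepare_data_for_word_vectors
-- ===== SOURCE A (Python) =====
-- def prepare_data_for_word_vectors(X):
--     sentences_as_words=[]
--     word_to_index={}
--     count=1
--     for sent in X:
--         temp = sent.split()
--         sentences_as_words.append(temp)
--     for sent in sentences_as_words:
--         for word in sent:
--             if word_to_index.get(word,None) is None:
--                 word_to_index[word] = count
--                 count +=1
--     index_to_word = {v:k for k,v in word_to_index.items()}
--     sentences=[]
--     for i in range(len(sentences_as_words)):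
--         temp = [word_to_index[w] for w in sentences_as_words[i]]
--         sentences.append(temp)
--
--
--     return sentences_as_words,sentences,word_to_index
-- ===== SOURCE B (Python) =====
-- def prepare_data_for_word_vectors(X):
--     sentences_as_words = []
--     sentences = []
--     word_to_index = {}
--     for sent in X:
--         words = sent.split()
--         sentences_as_words.append(words)
--         encoded = []
--         for w in words:
--             if w not in word_to_index:
--                 word_to_index[w] = len(word_to_index) + 1
--             encoded.append(word_to_index[w])
--         sentences.append(encoded)
--     return sentences_as_words, sentences, word_to_index
-- ===== Notes on version B (the rewrite author's own statement) =====
-- stated objective: simpler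
-- what changed: B fuses A's three separate passes (tokenize all, build the index over all sentences, then re-encode every sentence) into one loop over X that tokenizes, assigns first-seen IDs via len(dict)+1 and encodes each sentence as it goes, dropping the unused index_to_word dict
import Mathlib
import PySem

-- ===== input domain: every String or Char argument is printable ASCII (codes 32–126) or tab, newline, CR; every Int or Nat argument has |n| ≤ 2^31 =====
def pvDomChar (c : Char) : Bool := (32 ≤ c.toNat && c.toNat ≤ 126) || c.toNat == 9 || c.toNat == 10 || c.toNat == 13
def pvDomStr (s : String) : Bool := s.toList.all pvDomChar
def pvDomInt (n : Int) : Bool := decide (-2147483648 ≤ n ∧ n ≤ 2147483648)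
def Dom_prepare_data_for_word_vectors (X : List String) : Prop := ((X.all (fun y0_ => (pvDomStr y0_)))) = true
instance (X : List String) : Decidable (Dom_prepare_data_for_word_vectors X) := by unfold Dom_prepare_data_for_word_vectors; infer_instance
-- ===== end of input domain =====

-- B fuses A's three passes (tokenize, build index, re-encode) into one loop and drops the unused index_to_word; objective: simpler.

-- ===== PORT A =====
-- A's inner dict-building step: 'if word_to_index.get(word, None) is None: word_to_index[word] = count; count += 1'
def pvAStep (st : PySem.Dict String Int × Int) (word : String) : PySem.Dict String Int × Int :=
  if st.1.get? word = none then (st.1.insert word st.2, st.2 + 1) else st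

def prepare_data_for_word_vectors (X : List String) : List (List String) × List (List Int) × (List (String × Int)) :=
  let sentences_as_words := X.foldl (fun acc sent => acc ++ [PySem.Str.split₀ sent]) []
  let st := sentences_as_words.foldl (fun st sent => sent.foldl pvAStep st) (PySem.Dict.empty, 1)
  let word_to_index := st.1
  -- A also builds index_to_word = {v:k …} but never uses or returns it; nothing to port.
  -- 'word_to_index[w]' never misses (every w was inserted above); getD 0 is exact on the reached cases.
  let sentences := (PySem.List.pyRange 0 (sentences_as_words.length : Int) 1).foldl
    (fun acc i => acc ++ [(PySem.List.pyGetD sentences_as_words i []).map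
        (fun w => (word_to_index.get? w).getD 0)]) []
  (sentences_as_words, sentences, word_to_index.items)

-- ===== PORT B =====
-- B's per-word step: 'if w not in word_to_index: word_to_index[w] = len(word_to_index)+1' then 'encoded.append(word_to_index[w])'
def pvBStep (p : PySem.Dict String Int × List Int) (w : String) : PySem.Dict String Int × List Int :=
  let d := if p.1.contains w then p.1 else p.1.insert w ((p.1.size : Int) + 1)
  (d, p.2 ++ [d.getD w 0])

def prepare_data_for_word_vectors_alt (X : List String) : List (List String) × List (List Int) × (List (String × Int)) :=
  let st := X.foldl
    (fun (st : List (List String) × List (List Int) × PySem.Dict String Int) sent =>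
      let words := PySem.Str.split₀ sent
      let inner := words.foldl pvBStep (st.2.2, [])
      (st.1 ++ [words], st.2.1 ++ [inner.2], inner.1))
    ([], [], PySem.Dict.empty)
  (st.1, st.2.1, st.2.2.items)

-- ===== PRECONDITION & SPEC =====
def Spec_prepare_data_for_word_vectors (X : List String) (out : List (List String) × List (List Int) × (List (String × Int))) : Prop := out = prepare_data_for_word_vectors_alt X
instance (X : List String) (out : List (List String) × List (List Int) × (List (String × Int))) : Decidable (Spec_prepare_data_for_word_vectors X out) := by unfold Spec_prepare_data_for_word_vectors; infer_instance

-- ===== CLAIM (what is proved, stated in full; the proofs are below) =====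
def Claim_equal_prepare_data_for_word_vectors : Prop := ∀ (X : List String), Dom_prepare_data_for_word_vectors X → Spec_prepare_data_for_word_vectors X (prepare_data_for_word_vectors X)

-- ===== LEMMAS AND PROOFS =====

-- The pure dict update both steps perform on the dictionary component.
def pvDStep (d : PySem.Dict String Int) (w : String) : PySem.Dict String Int :=
  if d.contains w then d else d.insert w ((d.size : Int) + 1)

-- The dictionary after processing all words of all sentences of X, starting from d.
def pvDictAll (X : List String) (d : PySem.Dict String Int) : PySem.Dict String Int :=
  X.foldl (fun d s => (PySem.Str.split₀ s).foldl pvDStep d) d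

lemma pvAStep_eq (d : PySem.Dict String Int) (w : String) :
    pvAStep (d, (d.size : Int) + 1) w = (pvDStep d w, ((pvDStep d w).size : Int) + 1) := by
  unfold pvAStep pvDStep
  rcases hc : d.contains w with _ | _
  · have hg : d.get? w = none := by
      rw [← Option.not_isSome_iff_eq_none, ← PySem.Dict.contains_eq_isSome_get?, hc]; simp
    simp [hg, hc, PySem.Dict.size_insert]
  · have hg : (d.get? w).isSome := by rw [← PySem.Dict.contains_eq_isSome_get?]; exact hc
    simp [Option.isSome_iff_ne_none.mp hg]

lemma pvAfold_eq (ws : List String) (d : PySem.Dict String Int) :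
    ws.foldl pvAStep (d, (d.size : Int) + 1)
      = (ws.foldl pvDStep d, ((ws.foldl pvDStep d).size : Int) + 1) := by
  induction ws generalizing d with
  | nil => rfl
  | cons w rest ih => simp [List.foldl_cons, pvAStep_eq, ih]

lemma pvDStep_get?_eq {d : PySem.Dict String Int} {k : String} {v : Int}
    (h : d.get? k = some v) (w : String) : (pvDStep d w).get? k = some v := by
  unfold pvDStep
  rcases hc : d.contains w with _ | _
  · have hne : k ≠ w := by
      rintro rfl
      rw [PySem.Dict.contains_eq_isSome_get?, h] at hc; simp at hc
    simp [PySem.Dict.get?_insert_of_ne _ _ hne, h]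
  · exact h

lemma pvDfold_get?_eq {d : PySem.Dict String Int} {k : String} {v : Int}
    (h : d.get? k = some v) (ws : List String) : (ws.foldl pvDStep d).get? k = some v := by
  induction ws generalizing d with
  | nil => exact h
  | cons w rest ih => exact ih (pvDStep_get?_eq h w)

lemma pvDictAll_get?_eq {d : PySem.Dict String Int} {k : String} {v : Int}
    (h : d.get? k = some v) (X : List String) : (pvDictAll X d).get? k = some v := by
  induction X generalizing d with
  | nil => exact h
  | cons s rest ih => exact ih (pvDfold_get?_eq h _)

lemma pvDStep_get?_self (d : PySem.Dict String Int) (w : String) :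
    ∃ v, (pvDStep d w).get? w = some v := by
  unfold pvDStep
  rcases hc : d.contains w with _ | _
  · simp [PySem.Dict.get?_insert_self]
  · have hg : (d.get? w).isSome := by rw [← PySem.Dict.contains_eq_isSome_get?]; exact hc
    simpa using Option.isSome_iff_exists.mp hg

lemma pvDfold_get?_mem {ws : List String} {w : String} (h : w ∈ ws)
    (d : PySem.Dict String Int) : ∃ v, (ws.foldl pvDStep d).get? w = some v := by
  induction ws generalizing d with
  | nil => cases h
  | cons a rest ih =>
    rcases List.mem_cons.mp h with rfl | hmem
    · obtain ⟨v, hv⟩ := pvDStep_get?_self d w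
      exact ⟨v, pvDfold_get?_eq hv rest⟩
    · exact ih hmem _

lemma pvBfold (ws : List String) (d : PySem.Dict String Int) (enc : List Int) :
    ws.foldl pvBStep (d, enc)
      = (ws.foldl pvDStep d, enc ++ ws.map (fun w => ((ws.foldl pvDStep d).getD w 0))) := by
  induction ws generalizing d enc with
  | nil => simp
  | cons w rest ih =>
    have hstep : pvBStep (d, enc) w = (pvDStep d w, enc ++ [(pvDStep d w).getD w 0]) := rfl
    rw [List.foldl_cons, hstep, ih]
    obtain ⟨v, hv⟩ := pvDStep_get?_self d w
    have hfin : (rest.foldl pvDStep (pvDStep d w)).get? w = some v := pvDfold_get?_eq hv rest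
    simp [List.foldl_cons, PySem.Dict.getD_eq_get?_getD, hv, hfin]

-- Characterization of B's outer fold.
lemma pvOuter (X : List String) (sw : List (List String)) (ss : List (List Int))
    (d : PySem.Dict String Int) :
    X.foldl (fun (st : List (List String) × List (List Int) × PySem.Dict String Int) sent =>
        let words := PySem.Str.split₀ sent
        let inner := words.foldl pvBStep (st.2.2, [])
        (st.1 ++ [words], st.2.1 ++ [inner.2], inner.1)) (sw, ss, d)
      = (sw ++ X.map PySem.Str.split₀,
         ss ++ X.map (fun s => (PySem.Str.split₀ s).map (fun w => (pvDictAll X d).getD w 0)),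
         pvDictAll X d) := by
  induction X generalizing sw ss d with
  | nil => simp [pvDictAll]
  | cons s rest ih =>
    rw [List.foldl_cons]
    have hinner := pvBfold (PySem.Str.split₀ s) d []
    simp only [hinner, List.nil_append]
    rw [ih]
    have hd : pvDictAll (s :: rest) d
        = pvDictAll rest ((PySem.Str.split₀ s).foldl pvDStep d) := rfl
    have henc : (PySem.Str.split₀ s).map
          (fun w => (((PySem.Str.split₀ s).foldl pvDStep d).getD w 0))
        = (PySem.Str.split₀ s).map (fun w => ((pvDictAll (s :: rest) d).getD w 0)) := by
      refine List.map_congr_left (fun w hw => ?_)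
      obtain ⟨v, hv⟩ := pvDfold_get?_mem hw d
      have hall : (pvDictAll rest ((PySem.Str.split₀ s).foldl pvDStep d)).get? w = some v :=
        pvDictAll_get?_eq hv rest
      rw [PySem.Dict.getD_eq_get?_getD, PySem.Dict.getD_eq_get?_getD, hv, hd, hall]
    rw [henc, hd]
    simp

-- ===== VERDICT (by name: the statement is the Claim_ definition above) =====
-- A's sentence-by-sentence dict build equals the word-level fold with the count invariant.
lemma pvAOuter (L : List (List String)) (d : PySem.Dict String Int) :
    L.foldl (fun st sent => sent.foldl pvAStep st) (d, (d.size : Int) + 1)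
      = (L.foldl (fun d ws => ws.foldl pvDStep d) d,
         ((L.foldl (fun d ws => ws.foldl pvDStep d) d).size : Int) + 1) := by
  induction L generalizing d with
  | nil => rfl
  | cons ws rest ih => rw [List.foldl_cons, pvAfold_eq, ih]; rfl

lemma pvAOuterEmpty (L : List (List String)) :
    L.foldl (fun st sent => sent.foldl pvAStep st) (PySem.Dict.empty, 1)
      = (L.foldl (fun d ws => ws.foldl pvDStep d) PySem.Dict.empty,
         ((L.foldl (fun d ws => ws.foldl pvDStep d) PySem.Dict.empty).size : Int) + 1) := by
  simpa using pvAOuter L PySem.Dict.empty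

lemma pvDictAll_eq_map (X : List String) (d : PySem.Dict String Int) :
    (X.map PySem.Str.split₀).foldl (fun d ws => ws.foldl pvDStep d) d = pvDictAll X d := by
  rw [List.foldl_map]; rfl

-- ===== VERDICT (by name: the statement is the Claim_ definition above) =====
theorem prepare_data_for_word_vectors_spec : Claim_equal_prepare_data_for_word_vectors := by
  intro X _
  unfold Spec_prepare_data_for_word_vectors prepare_data_for_word_vectors
    prepare_data_for_word_vectors_alt
  rw [pvOuter]
  simp only [List.nil_append, PySem.List.foldl_append_singleton_eq_map, pvAOuterEmpty,
    pvDictAll_eq_map]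
  simp only [Prod.mk.injEq]
  refine ⟨trivial, ?_, trivial⟩
  have hcomp : (PySem.List.pyRange 0 ((X.map PySem.Str.split₀).length : Int) 1).map
        (fun i => (PySem.List.pyGetD (X.map PySem.Str.split₀) i []).map
          (fun w => ((pvDictAll X PySem.Dict.empty).get? w).getD 0))
      = ((PySem.List.pyRange 0 ((X.map PySem.Str.split₀).length : Int) 1).map
          (fun i => PySem.List.pyGetD (X.map PySem.Str.split₀) i [])).map
        (fun ws => ws.map (fun w => ((pvDictAll X PySem.Dict.empty).get? w).getD 0)) := by
    rw [List.map_map]; rfl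
  rw [hcomp, PySem.List.map_pyGetD_pyRange_zero', List.map_map]
  refine List.map_congr_left (fun s _ => ?_)
  refine List.map_congr_left (fun w _ => ?_)
  rw [PySem.Dict.getD_eq_get?_getD]
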